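-- pv_equiv track=rewrite | github.com/916-Socaciu-Serafim/peripeteya-car | peripeteya/BFMC_Peripeteya/src/modules/perception/lane_detection/image_processing/image_processing.py | accumulation_points_list
-- ===== SOURCE A (Python) =====
-- def accumulation_points_list(histogram: list, size: int):
--     """
--     Get maximum number of appearances in a histogram
--     :param histogram: list of integers
--     :param n: number of maximal points to choose
--     :return: maximal points x coordinate
--     """
--     accumulators = []
--     for x in range(len(histogram)):
--         value = 0
--         for i in range(x-size, x+size):
--             try:
--                 value += histogram[i]
--             except Exception:
--                 continue
--         accumulators.append(value)
--     return accumulators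
-- ===== SOURCE B (Python) =====
-- def accumulation_points_list(histogram: list, size: int):
--     # Prefix sums over the doubled list (index i in [-n, n) maps to histogram[i],
--     # i.e. doubled[i + n]); each window sum is one subtraction.
--     n = len(histogram)
--     pref = [0] * (2 * n + 1)
--     k = 0
--     for v in histogram + histogram:
--         pref[k + 1] = pref[k] + v
--         k += 1
--     out = []
--     for x in range(n):
--         lo = max(x - size, -n)
--         hi = min(x + size, n)
--         out.append(pref[hi + n] - pref[lo + n] if lo < hi else 0)
--     return out
-- ===== Notes on version B (the rewrite author's own statement) =====
-- stated objective: faster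
-- what changed: Replaces A's per-position rescan of the 2*size window (with try/except per index) by one prefix-sum pass over the doubled list, which reproduces Python's negative-index wraparound and out-of-range skip; each output is then a single subtraction of two clamped prefix sums.
import Mathlib
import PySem

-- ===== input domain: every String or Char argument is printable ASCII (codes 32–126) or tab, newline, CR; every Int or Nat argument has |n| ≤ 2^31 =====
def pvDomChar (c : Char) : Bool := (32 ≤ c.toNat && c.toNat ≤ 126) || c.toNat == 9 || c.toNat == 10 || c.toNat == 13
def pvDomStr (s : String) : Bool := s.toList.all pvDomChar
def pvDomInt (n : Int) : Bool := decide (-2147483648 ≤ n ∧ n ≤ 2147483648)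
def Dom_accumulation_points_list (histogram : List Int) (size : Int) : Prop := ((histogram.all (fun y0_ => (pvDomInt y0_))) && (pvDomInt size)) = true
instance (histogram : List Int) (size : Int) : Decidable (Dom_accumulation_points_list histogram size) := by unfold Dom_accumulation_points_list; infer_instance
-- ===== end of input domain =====

-- B replaces A's per-position rescan of the window (O(n·size)) by one prefix-sum pass
-- over the doubled list (covering Python's negative-index wraparound) — O(n), asymptotically faster.

-- ===== PORT A =====
def accumulation_points_list (histogram : List Int) (size : Int) : List Int :=
  (PySem.List.pyRange 0 (PySem.List.len histogram) 1).foldl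
    (fun accumulators x =>
      accumulators ++
        [(PySem.List.pyRange (x - size) (x + size) 1).foldl
            (fun value i =>
              match PySem.List.pyGet? histogram i with  -- try: value += histogram[i]; except: continue
              | some h => value + h
              | none => value) 0])
    []

-- ===== PORT B =====
-- prefix-sum loop of Source B: state = (pref list so far, running sum = last prefix)
def pvPrefStep (st : List Int × Int) (v : Int) : List Int × Int :=
  (st.1 ++ [st.2 + v], st.2 + v)

-- window value at x, from the prefix sums (the body of Source B's output loop)
def pvWindowB (pref : List Int) (n size x : Int) : Int :=
  if max (x - size) (-n) < min (x + size) n then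
    PySem.List.pyGetD pref (min (x + size) n + n) 0
      - PySem.List.pyGetD pref (max (x - size) (-n) + n) 0
  else 0

def accumulation_points_list_alt (histogram : List Int) (size : Int) : List Int :=
  let n : Int := PySem.List.len histogram
  let pref : List Int := ((histogram ++ histogram).foldl pvPrefStep ([0], 0)).1
  (PySem.List.pyRange 0 n 1).foldl
    (fun out x => out ++ [pvWindowB pref n size x]) []

-- ===== PRECONDITION & SPEC =====
def Spec_accumulation_points_list (histogram : List Int) (size : Int) (out : List Int) : Prop := out = accumulation_points_list_alt histogram size
instance (histogram : List Int) (size : Int) (out : List Int) : Decidable (Spec_accumulation_points_list histogram size out) := by unfold Spec_accumulation_points_list; infer_instance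

-- ===== CLAIM (what is proved, stated in full; the proofs are below) =====
def Claim_equal_accumulation_points_list : Prop := ∀ (histogram : List Int) (size : Int), Dom_accumulation_points_list histogram size → Spec_accumulation_points_list histogram size (accumulation_points_list histogram size)

-- ===== LEMMAS AND PROOFS =====

-- histogram[i] with Python semantics, 0 outside [-n, n)
def pvG (histogram : List Int) (i : Int) : Int := (PySem.List.pyGet? histogram i).getD 0

lemma pvG_zero (histogram : List Int) (i : Int)
    (h : i < -(histogram.length : Int) ∨ (histogram.length : Int) ≤ i) : pvG histogram i = 0 := by
  unfold pvG
  rw [(PySem.List.pyGet?_eq_none_iff histogram i).2]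
  · rfl
  · simp [PySem.Raise.InRange]; omega

-- the doubled list reads pvG at j - n
lemma pvDoubled_getElem (histogram : List Int) (j : Nat) (hj : j < 2 * histogram.length) :
    (histogram ++ histogram)[j]'(by simp; omega) = pvG histogram ((j : Int) - histogram.length) := by
  unfold pvG
  by_cases h : j < histogram.length
  · rw [List.getElem_append_left h]
    have hk : (0:Nat) < histogram.length - j := by omega
    have he : ((j : Int) - histogram.length) = -((histogram.length - j : Nat) : Int) := by
      push_cast [Nat.cast_sub (le_of_lt h)]; ring
    rw [he, PySem.List.pyGet?_neg_natCast histogram (histogram.length - j) hk (by omega)]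
    have he2 : histogram.length - (histogram.length - j) = j := by omega
    rw [he2, List.getElem?_eq_getElem h]
    rfl
  · rw [List.getElem_append_right (by omega)]
    have he : ((j : Int) - histogram.length) = ((j - histogram.length : Nat) : Int) := by
      push_cast [Nat.cast_sub (by omega : histogram.length ≤ j)]; ring
    rw [he, PySem.List.pyGet?_natCast]
    rw [List.getElem?_eq_getElem (by omega)]
    rfl

-- the prefix list built by Source B's loop
def pvPrefs (s : Int) : List Int → List Int
  | [] => []
  | v :: t => (s + v) :: pvPrefs (s + v) t

lemma pvPrefs_length (ds : List Int) : ∀ s, (pvPrefs s ds).length = ds.length := by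
  induction ds with
  | nil => intro s; rfl
  | cons v t ih => intro s; simp [pvPrefs, ih]

lemma pvFold_pvPrefStep (ds : List Int) : ∀ (p0 : List Int) (s0 : Int),
    ds.foldl pvPrefStep (p0, s0) = (p0 ++ pvPrefs s0 ds, s0 + ds.sum) := by
  induction ds with
  | nil => intro p0 s0; simp [pvPrefs]
  | cons v t ih => intro p0 s0; simp [pvPrefStep, pvPrefs, ih, List.append_assoc]; ring

lemma pvPrefs_getElem (ds : List Int) : ∀ (s : Int) (k : Nat) (hk : k < ds.length),
    (pvPrefs s ds)[k]'(by rw [pvPrefs_length]; exact hk) = s + (ds.take (k + 1)).sum := by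
  induction ds with
  | nil => intro s k hk; simp at hk
  | cons v t ih =>
    intro s k hk
    cases k with
    | zero => simp [pvPrefs]
    | succ j =>
      simp only [pvPrefs, List.getElem_cons_succ, List.take_succ_cons, List.sum_cons]
      rw [ih (s + v) j (by simpa using hk)]
      ring

-- pref[k] is the sum of the first k entries of the doubled list
lemma pvPref_getElem (ds : List Int) (k : Nat) (hk : k ≤ ds.length) :
    (0 :: pvPrefs 0 ds)[k]'(by simp [pvPrefs_length]; omega) = (ds.take k).sum := by
  cases k with
  | zero => simp
  | succ j => rw [List.getElem_cons_succ, pvPrefs_getElem ds 0 j (by omega)]; simp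

-- sum of pvG over a window inside [-n, n] is a difference of doubled-list prefix sums
lemma pvWindow_sum (histogram : List Int) (m : Nat) : ∀ (k1 : Int),
    -(histogram.length : Int) ≤ k1 → k1 + m ≤ (histogram.length : Int) →
    ((PySem.List.pyRange k1 (k1 + m) 1).map (pvG histogram)).sum =
      ((histogram ++ histogram).take (k1 + m + histogram.length).toNat).sum
        - ((histogram ++ histogram).take (k1 + histogram.length).toNat).sum := by
  induction m with
  | zero =>
    intro k1 h1 h2
    rw [PySem.List.pyRange_one_eq_nil (by simp)]
    simp
  | succ m ih =>
    intro k1 h1 h2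
    have hcast : k1 + ((m + 1 : Nat) : Int) = (k1 + m) + 1 := by push_cast; ring
    rw [hcast, PySem.List.pyRange_one_succ_right (by omega : k1 ≤ k1 + (m:Int))]
    rw [List.map_append, List.sum_append]
    rw [ih k1 h1 (by push_cast at h2 ⊢; omega)]
    have hidx : (k1 + (m:Int) + 1 + histogram.length).toNat = (k1 + m + histogram.length).toNat + 1 := by
      push_cast at h2; omega
    rw [hidx]
    have hlt : (k1 + (m:Int) + histogram.length).toNat < (histogram ++ histogram).length := by
      simp; push_cast at h2; omega
    rw [List.sum_take_succ _ _ hlt]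
    rw [pvDoubled_getElem histogram (k1 + (m:Int) + histogram.length).toNat (by simp at hlt; omega)]
    have he : ((((k1 + (m:Int) + histogram.length).toNat : Nat)) : Int) - histogram.length = k1 + m := by
      push_cast at h2; omega
    rw [he]
    simp; ring

-- clamping: pvG vanishes outside [-n, n)
lemma pvClamp (histogram : List Int) (a b : Int) :
    ((PySem.List.pyRange a b 1).map (pvG histogram)).sum =
      (if max a (-(histogram.length : Int)) < min b (histogram.length : Int) then
        ((PySem.List.pyRange (max a (-(histogram.length : Int))) (min b (histogram.length : Int)) 1).map (pvG histogram)).sum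
      else 0) := by
  set n : Int := (histogram.length : Int) with hn
  set lo := max a (-n) with hlo
  set hi := min b n with hhi
  split_ifs with h
  · have hal : a ≤ lo := le_max_left _ _
    have hlh : lo ≤ hi := le_of_lt h
    have hhb : hi ≤ b := min_le_left _ _
    rw [PySem.List.pyRange_one_append a lo b hal (le_trans hlh hhb)]
    rw [PySem.List.pyRange_one_append lo hi b hlh hhb]
    rw [List.map_append, List.sum_append, List.map_append, List.sum_append]
    have h1 : ((PySem.List.pyRange a lo 1).map (pvG histogram)).sum = 0 := by
      apply List.sum_eq_zero
      intro y hy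
      rcases List.mem_map.1 hy with ⟨i, hi', rfl⟩
      rw [PySem.List.mem_pyRange_one] at hi'
      apply pvG_zero
      rw [← hn]
      left
      rcases max_cases a (-n) with ⟨he, _⟩ | ⟨he, _⟩ <;> omega
    have h2 : ((PySem.List.pyRange hi b 1).map (pvG histogram)).sum = 0 := by
      apply List.sum_eq_zero
      intro y hy
      rcases List.mem_map.1 hy with ⟨i, hi', rfl⟩
      rw [PySem.List.mem_pyRange_one] at hi'
      apply pvG_zero
      rw [← hn]
      right
      rcases min_cases b n with ⟨he, _⟩ | ⟨he, _⟩ <;> omega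
    rw [h1, h2]; ring
  · apply List.sum_eq_zero
    intro y hy
    rcases List.mem_map.1 hy with ⟨i, hi', rfl⟩
    rw [PySem.List.mem_pyRange_one] at hi'
    apply pvG_zero
    rw [← hn]
    rcases max_cases a (-n) with ⟨he1, _⟩ | ⟨he1, _⟩ <;>
      rcases min_cases b n with ⟨he2, _⟩ | ⟨he2, _⟩ <;> omega


-- ===== VERDICT (by name: the statement is the Claim_ definition above) =====
-- ===== VERDICT helper proof =====
theorem accumulation_points_list_spec : Claim_equal_accumulation_points_list := by
  unfold Claim_equal_accumulation_points_list Spec_accumulation_points_list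
  intro histogram size _
  unfold accumulation_points_list accumulation_points_list_alt
  simp only [PySem.List.len_eq]
  rw [PySem.List.foldl_append_singleton_eq_map, PySem.List.foldl_append_singleton_eq_map]
  simp only [List.nil_append]
  apply List.map_congr_left
  intro x hx
  rw [PySem.List.mem_pyRange_one] at hx
  -- A side: the inner try/except loop is a sum of pvG over the window
  have hfun : (fun (value i : Int) =>
      match PySem.List.pyGet? histogram i with
      | some h => value + h
      | none => value) = fun value i => value + pvG histogram i := by
    funext value i
    unfold pvG
    cases PySem.List.pyGet? histogram i <;> simp
  rw [hfun, PySem.List.foldl_add, zero_add, pvClamp]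
  -- B side: the prefix list built by the fold
  rw [pvFold_pvPrefStep]
  simp only [List.cons_append, List.nil_append]
  unfold pvWindowB
  set lo := max (x - size) (-(histogram.length : Int)) with hlo
  set hi := min (x + size) (histogram.length : Int) with hhi
  have hpl : (0 :: pvPrefs 0 (histogram ++ histogram)).length = 2 * histogram.length + 1 := by
    simp [pvPrefs_length]; omega
  split_ifs with h
  · have hlon : -(histogram.length : Int) ≤ lo := le_max_right _ _
    have hhin : hi ≤ (histogram.length : Int) := min_le_right _ _
    have hhieq : hi = lo + (((hi - lo).toNat : Nat) : Int) := by omega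
    have e1 : PySem.List.pyGetD (0 :: pvPrefs 0 (histogram ++ histogram)) (lo + (((hi - lo).toNat : Nat) : Int) + histogram.length) 0
        = ((histogram ++ histogram).take (lo + (((hi - lo).toNat : Nat) : Int) + histogram.length).toNat).sum := by
      rw [PySem.List.pyGetD_eq_getElem _ _ (by omega) (by rw [hpl]; push_cast; omega)]
      exact pvPref_getElem _ _ (by simp; omega)
    have e2 : PySem.List.pyGetD (0 :: pvPrefs 0 (histogram ++ histogram)) (lo + histogram.length) 0
        = ((histogram ++ histogram).take (lo + histogram.length).toNat).sum := by
      rw [PySem.List.pyGetD_eq_getElem _ _ (by omega) (by rw [hpl]; push_cast; omega)]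
      exact pvPref_getElem _ _ (by simp; omega)
    rw [hhieq, pvWindow_sum histogram (hi - lo).toNat lo hlon (by omega), e1, e2]
  · rfl
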